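-- pv_equiv track=rewrite | github.com/L2F-INESC-ID/lex-sims | ta_sum.py | skip_bigrams
-- ===== SOURCE A (Python) =====
-- from operator import itemgetter
--
-- def skip_bigrams(lista, ngram=2):
-- 	vec = []
-- 	bi_gram_set = set()
--
-- 	for i in range(len(lista)):
-- 		for j in range(len(lista)):
-- 			if(lista[i] != lista[j] and i < j):
-- 				vec.append(itemgetter(i,j)(lista))
-- 	bi_gram_set.update(vec)
--
-- 	return(bi_gram_set)
-- ===== SOURCE B (Python) =====
-- def skip_bigrams(lista, ngram=2):
--     result = set()
--     seen = set()
--     rest = lista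
--     for a in lista:
--         rest = rest[1:]
--         if a not in seen:
--             seen.add(a)
--             for b in rest:
--                 if b != a:
--                     result.add((a, b))
--     return result
-- ===== Notes on version B (the rewrite author's own statement) =====
-- stated objective: alternative
-- what changed: A builds a quadratic list of pairs via two full index loops with itemgetter and only then dumps it into a set; B walks the list once with its shrinking suffix, skips every element whose value was already processed via a 'seen' set, and inserts the surviving pairs into the result set directly, so repeated values are never re-scanned.
import Mathlib
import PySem

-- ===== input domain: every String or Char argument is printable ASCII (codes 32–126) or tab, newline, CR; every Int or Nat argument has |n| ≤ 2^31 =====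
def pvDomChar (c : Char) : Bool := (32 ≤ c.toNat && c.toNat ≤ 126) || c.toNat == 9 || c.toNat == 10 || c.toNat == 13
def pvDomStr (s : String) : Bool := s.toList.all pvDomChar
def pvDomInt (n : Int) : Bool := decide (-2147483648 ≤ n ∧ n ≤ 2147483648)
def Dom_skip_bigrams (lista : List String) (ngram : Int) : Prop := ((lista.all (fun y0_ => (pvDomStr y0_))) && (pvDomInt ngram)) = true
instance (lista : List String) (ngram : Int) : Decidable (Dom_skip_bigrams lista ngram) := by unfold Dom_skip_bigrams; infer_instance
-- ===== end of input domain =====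

-- B replaces A's double index loop + deferred set.update by a single suffix walk that skips
-- already-seen first elements via a 'seen' set and adds pairs into the result set directly (objective: alternative).

-- ===== PORT A =====
-- i and j always lie in range(len(lista)), so pyGetD's default is never used
def skip_bigrams (lista : List String) (ngram : Int) : List (String × String) :=
  let vec : List (String × String) :=
    (PySem.List.pyRange 0 (lista.length : Int) 1).foldl (fun vec i =>
      (PySem.List.pyRange 0 (lista.length : Int) 1).foldl (fun vec j =>
        if PySem.List.pyGetD lista i "" ≠ PySem.List.pyGetD lista j "" ∧ i < j
        then vec ++ [(PySem.List.pyGetD lista i "", PySem.List.pyGetD lista j "")]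
        else vec) vec) []
  PySem.Set.update PySem.Set.empty vec

-- ===== PORT B =====
def skip_bigrams_alt (lista : List String) (ngram : Int) : List (String × String) :=
  (lista.foldl
    (fun (st : (PySem.Set (String × String) × PySem.Set String) × List String) a =>
      let rest := PySem.List.slice st.2 (some 1) none
      if PySem.Set.contains st.1.2 a then ((st.1.1, st.1.2), rest)
      else
        ((rest.foldl (fun res b => if b ≠ a then PySem.Set.add res (a, b) else res) st.1.1,
          PySem.Set.add st.1.2 a), rest))
    ((PySem.Set.empty, PySem.Set.empty), lista)).1.1

-- ===== PRECONDITION & SPEC =====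
def Spec_skip_bigrams (lista : List String) (ngram : Int) (out : List (String × String)) : Prop := out = skip_bigrams_alt lista ngram
instance (lista : List String) (ngram : Int) (out : List (String × String)) : Decidable (Spec_skip_bigrams lista ngram out) := by unfold Spec_skip_bigrams; infer_instance

-- ===== CLAIM (what is proved, stated in full; the proofs are below) =====
def Claim_equal_skip_bigrams : Prop := ∀ (lista : List String) (ngram : Int), Dom_skip_bigrams lista ngram → Spec_skip_bigrams lista ngram (skip_bigrams lista ngram)

-- ===== LEMMAS AND PROOFS =====

-- the unequal-value pairs (l[i], l[j]), i < j, in A's (i, j)-lexicographic emission order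
def pvPairs : List String → List (String × String)
  | [] => []
  | x :: r => (r.filter (fun b => x ≠ b)).map (fun b => (x, b)) ++ pvPairs r

lemma pvMapRange (r : List String) : (List.range r.length).map (fun k => r.getD k "") = r := by
  apply List.ext_getElem <;> simp
  intro i h1 h2
  simp [List.getElem?_eq_getElem h1]

-- an index-level filter/map over range(len r) reading only values is the value-level filter/map
lemma pvIdxToVal {β : Type} (r : List String) (p : String → Bool) (f : String → β) :
    ((List.range r.length).filter (fun k => p (r.getD k ""))).map (fun k => f (r.getD k "")) =
      (r.filter p).map f := by
  calc ((List.range r.length).filter (fun k => p (r.getD k ""))).map (fun k => f (r.getD k ""))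
      = (((List.range r.length).filter (fun k => p (r.getD k ""))).map (fun k => r.getD k "")).map f := by
        rw [List.map_map]; rfl
    _ = (((List.range r.length).map (fun k => r.getD k "")).filter p).map f := by
        rw [List.filter_map]; rfl
    _ = (r.filter p).map f := by rw [pvMapRange]

-- A's nested index loops emit exactly pvPairs l
lemma pvA_vec (l : List String) :
    (List.range l.length).flatMap (fun i =>
      ((List.range l.length).filter (fun j => decide (l.getD i "" ≠ l.getD j "" ∧ i < j))).map
        (fun j => (l.getD i "", l.getD j ""))) = pvPairs l := by
  induction l with
  | nil => simp [pvPairs]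
  | cons x r ih =>
    rw [List.length_cons, List.range_succ_eq_map, List.flatMap_cons]
    have hhead : ((0 :: (List.range r.length).map (· + 1)).filter
          (fun j => decide ((x :: r).getD 0 "" ≠ (x :: r).getD j "" ∧ 0 < j))).map
          (fun j => ((x :: r).getD 0 "", (x :: r).getD j "")) =
        (r.filter (fun b => x ≠ b)).map (fun b => (x, b)) := by
      rw [List.filter_cons]
      simp only [List.getD_cons_zero, List.getD_cons_succ, Nat.lt_irrefl, and_false, decide_false,
        Bool.false_eq_true, if_false, List.filter_map, Function.comp_def, List.map_map,
        Nat.zero_lt_succ, and_true]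
      exact pvIdxToVal r (fun b => decide (x ≠ b)) (fun b => (x, b))
    have htail : ((List.range r.length).map (· + 1)).flatMap (fun i =>
          ((0 :: (List.range r.length).map (· + 1)).filter
            (fun j => decide ((x :: r).getD i "" ≠ (x :: r).getD j "" ∧ i < j))).map
          (fun j => ((x :: r).getD i "", (x :: r).getD j ""))) = pvPairs r := by
      rw [List.flatMap_map]
      rw [← ih]
      apply List.flatMap_congr
      intro k hk
      rw [List.filter_cons]
      simp only [Function.comp_def, List.getD_cons_succ, Nat.not_lt_zero, and_false, decide_false,
        Bool.false_eq_true, if_false, List.filter_map, List.map_map, Nat.add_lt_add_iff_right]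
    rw [pvPairs]
    rw [← hhead, ← htail]

lemma pvA_eq (lista : List String) (ngram : Int) :
    skip_bigrams lista ngram = PySem.Set.update PySem.Set.empty (pvPairs lista) := by
  unfold skip_bigrams
  rw [← pvA_vec lista]
  simp only [PySem.List.foldl_append_ite, PySem.List.foldl_append_eq_flatMap,
    PySem.List.pyRange_zero_natCast]
  rw [List.flatMap_map]
  simp only [Function.comp_def, PySem.List.pyGetD_natCast, List.filter_map, List.map_map,
    Nat.cast_lt]
  rw [List.nil_append]

-- the second component of a pvPairs element occurs in l and differs from the first
lemma pv_mem_pvPairs (l : List String) (pr : String × String) (h : pr ∈ pvPairs l) :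
    pr.2 ∈ l ∧ pr.2 ≠ pr.1 := by
  induction l with
  | nil => simp [pvPairs] at h
  | cons x r ih =>
    simp only [pvPairs, List.mem_append, List.mem_map, List.mem_filter] at h
    rcases h with ⟨b, ⟨hb, hne⟩, rfl⟩ | h
    · exact ⟨List.mem_cons_of_mem _ hb, by simpa [eq_comm] using (by simpa using hne : x ≠ b)⟩
    · exact ⟨List.mem_cons_of_mem _ (ih h).1, (ih h).2⟩

-- update ignores already-present elements, so a stronger filter costs nothing when the dropped ones are in S
lemma pvK {α : Type} [BEq α] [LawfulBEq α] (v : List α) (S : PySem.Set α) (p q : α → Bool)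
    (hqp : ∀ e ∈ v, q e = true → p e = true)
    (hmem : ∀ e ∈ v, p e = true → q e = false → e ∈ S) :
    PySem.Set.update S (v.filter q) = PySem.Set.update S (v.filter p) := by
  induction v generalizing S with
  | nil => rfl
  | cons e t ih =>
    have hmono : ∀ x : α, x ∈ S → x ∈ PySem.Set.add S e := fun x hx =>
      (PySem.Set.mem_add S e x).mpr (Or.inl hx)
    cases hq : q e <;> cases hp : p e
    · simp only [List.filter_cons, hq, hp, Bool.false_eq_true, if_false]
      exact ih S (fun e he => hqp e (List.mem_cons_of_mem _ he))
        (fun e he hpe hqe => hmem e (List.mem_cons_of_mem _ he) hpe hqe)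
    · -- p true, q false: e is already in S, so the extra add on the right is a no-op
      have heS : e ∈ S := hmem e List.mem_cons_self hp hq
      simp only [List.filter_cons, hq, hp, Bool.false_eq_true, if_false, if_true,
        PySem.Set.update, List.foldl_cons]
      rw [PySem.Set.add_of_mem heS]
      exact ih S (fun e he => hqp e (List.mem_cons_of_mem _ he))
        (fun e he hpe hqe => hmem e (List.mem_cons_of_mem _ he) hpe hqe)
    · exact absurd (hqp e List.mem_cons_self hq) (by simp [hp])
    · simp only [List.filter_cons, hq, hp, if_true, PySem.Set.update, List.foldl_cons]
      exact ih (PySem.Set.add S e) (fun e he => hqp e (List.mem_cons_of_mem _ he))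
        (fun x hx hpx hqx => hmono x (hmem x (List.mem_cons_of_mem _ hx) hpx hqx))

-- B's inner loop is a set-update with the pairs (x, b), b ∈ r, b ≠ x
lemma pv_inner (x : String) (r : List String) (res : PySem.Set (String × String)) :
    r.foldl (fun res b => if b ≠ x then PySem.Set.add res (x, b) else res) res =
      PySem.Set.update res ((r.filter (fun b => x ≠ b)).map (fun b => (x, b))) := by
  rw [PySem.List.foldl_ite_eq_foldl_filter (fun b => b ≠ x)
    (fun res b => PySem.Set.add res (x, b)) r res]
  rw [show r.filter (fun b => decide (b ≠ x)) = r.filter (fun b => x ≠ b) from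
    List.filter_congr (fun b _ => by simp [ne_comm])]
  simp only [PySem.Set.update, List.foldl_map]

-- invariant of B's outer loop: with 'seen'-values skipped, it is one big filtered set-update
lemma pvB_loop (l : List String) (res : PySem.Set (String × String)) (seen : PySem.Set String) :
    (l.foldl
      (fun (st : (PySem.Set (String × String) × PySem.Set String) × List String) a =>
        let rest := PySem.List.slice st.2 (some 1) none
        if PySem.Set.contains st.1.2 a then ((st.1.1, st.1.2), rest)
        else
          ((rest.foldl (fun res b => if b ≠ a then PySem.Set.add res (a, b) else res) st.1.1,
            PySem.Set.add st.1.2 a), rest))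
      ((res, seen), l)).1.1 =
      PySem.Set.update res ((pvPairs l).filter (fun pr => !(PySem.Set.contains seen pr.1))) := by
  induction l generalizing res seen with
  | nil => rfl
  | cons x r ih =>
    rw [List.foldl_cons]
    simp only [PySem.List.slice_from_one, pv_inner] at ih ⊢
    cases hc : PySem.Set.contains seen x
    · -- x not yet seen: its pairs are added now; later occurrences of x contribute nothing new
      simp only [List.tail_cons, Bool.false_eq_true, if_false]
      rw [ih]
      have hu : ∀ pr : String × String,
          pr ∈ (r.filter (fun b => x ≠ b)).map (fun b => (x, b)) → pr.1 = x := by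
        intro pr hpr
        rcases List.mem_map.mp hpr with ⟨b, _, rfl⟩; rfl
      rw [show (pvPairs (x :: r)).filter (fun pr => !(PySem.Set.contains seen pr.1)) =
          ((r.filter (fun b => x ≠ b)).map (fun b => (x, b))).filter
              (fun pr => !(PySem.Set.contains seen pr.1))
            ++ (pvPairs r).filter (fun pr => !(PySem.Set.contains seen pr.1)) from by
        rw [pvPairs]; exact List.filter_append _ _]
      rw [show ((r.filter (fun b => x ≠ b)).map (fun b => (x, b))).filter
            (fun pr => !(PySem.Set.contains seen pr.1)) =
          (r.filter (fun b => x ≠ b)).map (fun b => (x, b)) from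
        List.filter_eq_self.mpr (fun pr hpr => by rw [hu pr hpr, hc]; rfl)]
      rw [show ∀ (s : PySem.Set (String × String)) u v, PySem.Set.update s (u ++ v) =
          PySem.Set.update (PySem.Set.update s u) v from fun s u v => List.foldl_append]
      apply pvK
      · intro e _ hq
        simp only [Bool.not_eq_eq_eq_not, Bool.not_true] at hq ⊢
        cases hcs : PySem.Set.contains seen e.1
        · rfl
        · exact absurd ((PySem.Set.contains_iff _ _).mpr ((PySem.Set.mem_add seen x e.1).mpr
            (Or.inl ((PySem.Set.contains_iff seen e.1).mp hcs)))) (fun h => by rw [hq] at h; cases h)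
      · intro e he hp hq
        simp only [Bool.not_eq_eq_eq_not, Bool.not_true, Bool.not_false] at hp hq
        have h1 : e.1 ∈ PySem.Set.add seen x := (PySem.Set.contains_iff _ _).mp hq
        have h2 : e.1 ∉ seen := by
          intro h; rw [← PySem.Set.contains_iff] at h; rw [h] at hp; cases hp
        have hx : e.1 = x := ((PySem.Set.mem_add seen x e.1).mp h1).resolve_left h2
        have hep := pv_mem_pvPairs r e he
        apply (PySem.Set.mem_update _ _ _).mpr (Or.inr _)
        rcases e with ⟨a, b⟩
        simp only at hx; subst hx
        exact List.mem_map.mpr ⟨b, List.mem_filter.mpr ⟨hep.1, by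
          simpa using (by simpa using hep.2 : b ≠ a).symm⟩, rfl⟩
    · -- x already seen: all its pairs were filtered out before, and are filtered out now too
      simp only [List.tail_cons, if_true]
      rw [ih]
      congr 1
      rw [pvPairs, List.filter_append]
      rw [show ((r.filter (fun b => x ≠ b)).map (fun b => (x, b))).filter
            (fun pr => !(PySem.Set.contains seen pr.1)) = [] from by
        apply List.filter_eq_nil_iff.mpr
        intro pr hpr
        rcases List.mem_map.mp hpr with ⟨b, _, rfl⟩
        simp [hc]
        exact (PySem.Set.contains_iff seen x).mp hc]
      rfl

lemma pvB_eq (lista : List String) (ngram : Int) :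
    skip_bigrams_alt lista ngram = PySem.Set.update PySem.Set.empty (pvPairs lista) := by
  unfold skip_bigrams_alt
  rw [pvB_loop]
  congr 1
  exact List.filter_eq_self.mpr (fun pr _ => rfl)

-- ===== VERDICT (by name: the statement is the Claim_ definition above) =====
theorem skip_bigrams_spec : Claim_equal_skip_bigrams := by
  intro lista ngram _
  unfold Spec_skip_bigrams
  rw [pvA_eq, pvB_eq]
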